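-- pv_equiv track=rewrite | github.com/jgrou/ProjectEuler | FractionsAndSumOfPowersOfTwo.py | EvenWithFinal1
-- ===== SOURCE A (Python) =====
-- def even(BinExp):
--     if len(BinExp) & 1:  # Odd number
--         return even(BinExp[:-1])
--     if len(BinExp) == 0:
--         return 1
--     res = (BinExp[0] * BinExp[1] + 1) * even(BinExp[2:])
--     if len(BinExp) > 2:
--         res += BinExp[0] * BinExp[-1]
--     for i in range(3, len(BinExp)-2, 2):
--         res += BinExp[0] * BinExp[i] * even(BinExp[i+1:])
--     return res
--
-- def EvenWithFinal1(BinExp):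
--     if len(BinExp) == 0:
--         return 1
--     res = (BinExp[-2] + 1) * even(BinExp[:-2])
--     if len(BinExp) > 2:
--         res += BinExp[0]
--     for i in range(3, len(BinExp)-2, 2):
--         res += BinExp[i] * even(BinExp[:i])
--     return res
-- ===== SOURCE B (Python) =====
-- def EvenWithFinal1(BinExp):
--     # O(n) via the continuant (continued-fraction) recurrence over prefixes,
--     # replacing A's exponential recursion.
--     n = len(BinExp)
--     if n == 0:
--         return 1
--     # K[m] = continuant of BinExp[:m]:  K[0]=1, K[1]=BinExp[0],
--     # K[m] = BinExp[m-1]*K[m-1] + K[m-2];  even(BinExp[:m]) == K[m - m % 2].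
--     K = [1, BinExp[0]]
--     for m in range(2, n + 1):
--         K.append(BinExp[m - 1] * K[m - 1] + K[m - 2])
--     res = (BinExp[-2] + 1) * K[(n - 2) - (n - 2) % 2]
--     if n > 2:
--         res += BinExp[0]
--     for i in range(3, n - 2, 2):
--         res += BinExp[i] * K[i - 1]
--     return res
-- ===== Notes on version B (the rewrite author's own statement) =====
-- stated objective: faster
-- what changed: A's exponential tree recursion even() is replaced by the continuant (continued-fraction numerator) three-term linear recurrence: one O(n) pass builds a table K[m] of prefix continuants and the result is read off it, since even(x) equals the continuant of x (minus a trailing odd element). Intended as asymptotically faster; measured: A timed out at n=64 where B returned, at n=16 both finish in under 1 ms (ratio 1.45, too small to confirm).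
import Mathlib
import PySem

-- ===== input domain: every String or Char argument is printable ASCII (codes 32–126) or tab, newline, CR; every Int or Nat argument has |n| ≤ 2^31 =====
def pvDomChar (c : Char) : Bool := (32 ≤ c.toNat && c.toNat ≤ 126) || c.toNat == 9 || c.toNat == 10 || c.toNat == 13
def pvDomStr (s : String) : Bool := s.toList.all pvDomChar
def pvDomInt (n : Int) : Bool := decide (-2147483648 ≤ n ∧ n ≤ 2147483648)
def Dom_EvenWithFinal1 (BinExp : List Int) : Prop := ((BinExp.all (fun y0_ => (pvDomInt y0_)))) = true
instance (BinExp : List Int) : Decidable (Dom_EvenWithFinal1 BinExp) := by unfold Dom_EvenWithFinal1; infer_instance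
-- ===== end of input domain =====

-- B replaces A's tree recursion even() by the continuant three-term recurrence over
-- prefixes (table K), one linear pass (intended as faster; a timing run saw A time
-- out at n=64 where B returned, but could not confirm a ratio at sizes both finish).
-- Equivalence proved on all lists of length ≠ 1 (A raises IndexError on length-1 input).


-- ===== PORT A =====
-- even(): literal transliteration of A's recursive helper; the Nat fuel only makes
-- the recursion structural (every recursive call is on a strictly shorter list, so
-- fuel = length + 1 always suffices and is what `even` passes).
def evenFuel : Nat → List Int → Int
  | 0, _ => 0
  | fuel+1, b =>
    if b.length % 2 = 1 then
      evenFuel fuel (PySem.List.slice b none (some (-1)))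
    else if b.length = 0 then 1
    else
      let res := (PySem.List.pyGetD b 0 0 * PySem.List.pyGetD b 1 0 + 1) *
                   evenFuel fuel (PySem.List.slice b (some 2) none)
      let res := if (2 : Int) < (b.length : Int) then
                   res + PySem.List.pyGetD b 0 0 * PySem.List.pyGetD b (-1) 0
                 else res
      (PySem.List.pyRange 3 ((b.length : Int) - 2) 2).foldl
        (fun r i => r + PySem.List.pyGetD b 0 0 * PySem.List.pyGetD b i 0 *
            evenFuel fuel (PySem.List.slice b (some (i+1)) none)) res

def even (b : List Int) : Int := evenFuel (b.length + 1) b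

def EvenWithFinal1 (BinExp : List Int) : Int :=
  if BinExp.length = 0 then 1
  else
    let res := (PySem.List.pyGetD BinExp (-2) 0 + 1) *
                 even (PySem.List.slice BinExp none (some (-2)))
    let res := if (2 : Int) < (BinExp.length : Int) then
                 res + PySem.List.pyGetD BinExp 0 0
               else res
    (PySem.List.pyRange 3 ((BinExp.length : Int) - 2) 2).foldl
      (fun r i => r + PySem.List.pyGetD BinExp i 0 *
          even (PySem.List.slice BinExp none (some i))) res

-- ===== PORT B =====
def EvenWithFinal1_alt (BinExp : List Int) : Int :=
  if BinExp.length = 0 then 1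
  else
    -- K[m] = continuant of BinExp[:m]
    let K := (PySem.List.pyRange 2 ((BinExp.length : Int) + 1) 1).foldl
      (fun K m => K ++ [PySem.List.pyGetD BinExp (m-1) 0 * PySem.List.pyGetD K (m-1) 0
                        + PySem.List.pyGetD K (m-2) 0])
      [1, PySem.List.pyGetD BinExp 0 0]
    let res := (PySem.List.pyGetD BinExp (-2) 0 + 1) *
                 PySem.List.pyGetD K (((BinExp.length : Int) - 2) -
                   PySem.Int.mod ((BinExp.length : Int) - 2) 2) 0
    let res := if (2 : Int) < (BinExp.length : Int) then
                 res + PySem.List.pyGetD BinExp 0 0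
               else res
    (PySem.List.pyRange 3 ((BinExp.length : Int) - 2) 2).foldl
      (fun r i => r + PySem.List.pyGetD BinExp i 0 * PySem.List.pyGetD K (i-1) 0) res

-- ===== PRECONDITION & SPEC =====
-- Pre_ excludes exactly the length-1 lists, on which A raises IndexError (BinExp[-2]).
def Pre_EvenWithFinal1 (BinExp : List Int) : Prop := BinExp.length ≠ 1
instance (BinExp : List Int) : Decidable (Pre_EvenWithFinal1 BinExp) := by
  unfold Pre_EvenWithFinal1; infer_instance
def pvWitness_EvenWithFinal1 : List Int := [1, 2, 3, 4]

def Spec_EvenWithFinal1 (BinExp : List Int) (out : Int) : Prop := out = EvenWithFinal1_alt BinExp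
instance (BinExp : List Int) (out : Int) : Decidable (Spec_EvenWithFinal1 BinExp out) := by
  unfold Spec_EvenWithFinal1; infer_instance

-- ===== CLAIM (what is proved, stated in full; the proofs are below) =====
def Claim_equal_EvenWithFinal1 : Prop := ∀ (BinExp : List Int), Dom_EvenWithFinal1 BinExp → Pre_EvenWithFinal1 BinExp → Spec_EvenWithFinal1 BinExp (EvenWithFinal1 BinExp)

-- ===== LEMMAS AND PROOFS =====

def contK : List Int → Int
  | [] => 1
  | [a] => a
  | a :: c :: t => a * contK (c :: t) + contK t

theorem contK_cons (a : Int) (t : List Int) (h : t ≠ []) :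
    contK (a :: t) = a * contK t + contK t.tail := by
  match t with
  | [] => exact absurd rfl h
  | c :: t' => rfl

theorem contK_append_singleton (y : List Int) (a : Int) :
    contK (y ++ [a]) = a * contK y + (if y = [] then 0 else contK y.dropLast) := by
  induction y using contK.induct with
  | case1 => simp [contK]
  | case2 b => simp [contK]; ring
  | case3 b c t ih1 ih2 =>
    have h1 : contK ((b :: c :: t) ++ [a]) = b * contK ((c :: t) ++ [a]) + contK (t ++ [a]) := by
      cases t <;> rfl
    rw [h1, ih1, ih2]
    simp only [List.cons_ne_nil, if_false]
    rcases eq_or_ne t [] with rfl | ht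
    · simp [contK]; ring
    · rw [if_neg ht]
      have h2 : (b :: c :: t).dropLast = b :: (c :: t).dropLast := by simp
      rw [h2]
      have h3 : ((c :: t).dropLast).tail = t.dropLast := by
        cases t with
        | nil => simp at ht
        | cons u t' => simp
      rw [contK_cons b ((c :: t).dropLast) (by cases t with
            | nil => simp at ht
            | cons u t' => simp),
          h3, contK_cons b (c :: t) (by simp)]
      simp only [List.tail_cons]
      ring

theorem contK_odd_expand (t : List Int) (h : t.length % 2 = 1) :
    contK t = ((List.range ((t.length - 1) / 2)).map
        (fun k => t.getD (2 * k) 0 * contK (t.drop (2 * k + 1)))).sum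
      + t.getD (t.length - 1) 0 := by
  induction t using contK.induct with
  | case1 => simp at h
  | case2 b => simp [contK]
  | case3 b c t ih1 ih2 =>
    have hlen : t.length % 2 = 1 := by simp at h; omega
    have hne : t ≠ [] := by intro hh; rw [hh] at hlen; simp at hlen
    have hq : ((b :: c :: t).length - 1) / 2 = (t.length - 1) / 2 + 1 := by
      simp; omega
    rw [hq, List.range_succ_eq_map]
    simp only [List.map_cons, List.sum_cons, List.map_map]
    have hbody : ∀ k : Nat,
        ((fun k => (b :: c :: t).getD (2 * k) 0 * contK ((b :: c :: t).drop (2 * k + 1))) ∘ Nat.succ) k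
        = (fun k => t.getD (2 * k) 0 * contK (t.drop (2 * k + 1))) k := by
      intro k
      simp only [Function.comp]
      have e1 : 2 * Nat.succ k = 2 * k + 2 := by omega
      rw [e1]
      simp [List.getD]
    rw [List.map_congr_left (fun k _ => hbody k)]
    have hfin : (b :: c :: t).getD ((b :: c :: t).length - 1) 0 = t.getD (t.length - 1) 0 := by
      have : (b :: c :: t).length - 1 = t.length + 1 := by simp
      have e2 : t.length + 1 = (t.length - 1) + 1 + 1 := by
        cases t with | nil => exact absurd rfl hne | cons u t' => simp
      rw [this, e2, List.getD_cons_succ, List.getD_cons_succ]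
    rw [hfin]
    have : contK (b :: c :: t) = b * contK (c :: t) + contK t := rfl
    rw [this, ih2 hlen]
    simp [List.getD]
    ring

theorem loop_sum (b : List Int) (hn : 4 ≤ b.length) (hpar : b.length % 2 = 0) :
    ((PySem.List.pyRange 3 ((b.length : Int) - 2) 2).map
        (fun i => PySem.List.pyGetD b i 0 * contK (b.drop (i + 1).toNat))).sum
      = contK (b.drop 3) - b.getD (b.length - 1) 0 := by
  rw [PySem.List.pyRange_of_pos 3 ((b.length : Int) - 2) (by norm_num)]
  have hcnt : (if (3:Int) < (b.length : Int) - 2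
      then (((b.length : Int) - 2 - 3 + 2 - 1) / 2).toNat else 0) = (b.length - 4) / 2 := by
    split_ifs <;> omega
  rw [hcnt, List.map_map]
  have ht : (b.drop 3).length % 2 = (b.length - 3) % 2 := by simp
  have hexp := contK_odd_expand (b.drop 3)
  have hlen3 : (b.drop 3).length = b.length - 3 := by simp
  -- pointwise identification of the two maps
  have hbody : ∀ k ∈ List.range ((b.length - 4) / 2),
      ((fun i => PySem.List.pyGetD b i 0 * contK (b.drop (i + 1).toNat)) ∘ fun k : Nat => 3 + 2 * (k : Int)) k
      = (fun k => (b.drop 3).getD (2 * k) 0 * contK ((b.drop 3).drop (2 * k + 1))) k := by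
    intro k hk
    simp only [Function.comp]
    have h1 : PySem.List.pyGetD b (3 + 2 * (k : Int)) 0 = b.getD (3 + 2 * k) 0 := by
      rw [PySem.List.pyGetD_of_nonneg b 0 (by omega)]
      have : ((3:Int) + 2 * (k:Int)).toNat = 3 + 2 * k := by omega
      rw [List.getD, List.getD, this]
    have h2 : (3 + 2 * (k : Int) + 1).toNat = 4 + 2 * k := by omega
    have h3 : (b.drop 3).getD (2 * k) 0 = b.getD (3 + 2 * k) 0 := by
      simp [List.getD, List.getElem?_drop]
    have h4 : (b.drop 3).drop (2 * k + 1) = b.drop (4 + 2 * k) := by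
      rw [List.drop_drop]
      congr 1
    rw [h1, h2, h3, h4]
  rw [List.map_congr_left hbody]
  have hq : ((b.drop 3).length - 1) / 2 = (b.length - 4) / 2 := by
    simp only [List.length_drop]; omega
  rw [hq] at hexp
  have hfin : (b.drop 3).getD ((b.drop 3).length - 1) 0 = b.getD (b.length - 1) 0 := by
    have e : (b.drop 3).length - 1 = b.length - 4 := by
      simp only [List.length_drop]; omega
    rw [e, List.getD, List.getD, List.getElem?_drop]
    have e2 : 3 + (b.length - 4) = b.length - 1 := by omega
    rw [e2]
  rw [hfin] at hexp
  have hodd : (b.drop 3).length % 2 = 1 := by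
    simp only [List.length_drop]; omega
  have := hexp hodd
  omega

def evenK (b : List Int) : Int :=
  if b.length % 2 = 0 then contK b else contK b.dropLast

theorem evenFuel_eq : ∀ (fuel : Nat) (b : List Int), b.length < fuel → evenFuel fuel b = evenK b := by
  intro fuel
  induction fuel with
  | zero => intro b hb; omega
  | succ f ih =>
    intro b hb
    by_cases hodd : b.length % 2 = 1
    · simp only [evenFuel, if_pos hodd, PySem.List.slice_to_neg_one]
      rw [ih b.dropLast (by simp only [List.length_dropLast]; omega)]
      rw [evenK, evenK, if_pos (by simp only [List.length_dropLast]; omega), if_neg (by omega)]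
    · have h2 : b.length % 2 = 0 := by omega
      by_cases h0 : b.length = 0
      · obtain rfl := List.length_eq_zero_iff.mp h0
        simp [evenFuel, evenK, contK]
      · have hn2 : 2 ≤ b.length := by omega
        simp only [evenFuel, if_neg hodd, if_neg h0]
        rw [PySem.List.slice_from b (by norm_num)]
        have ht2 : ((2:Int)).toNat = 2 := rfl
        rw [ht2, ih (b.drop 2) (by simp only [List.length_drop]; omega)]
        have hK2 : evenK (b.drop 2) = contK (b.drop 2) := by
          rw [evenK, if_pos (by simp only [List.length_drop]; omega)]
        rw [hK2]
        rw [PySem.List.foldl_congr_mem _ _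
          (fun r i => r + PySem.List.pyGetD b 0 0 *
            (PySem.List.pyGetD b i 0 * contK (b.drop (i+1).toNat))) _
          (by
            intro acc i hi
            obtain ⟨h3le, hlt, hdvd⟩ := (PySem.List.mem_pyRange_iff_of_pos (by norm_num) i).mp hi
            rw [PySem.List.slice_from b (by omega)]
            rw [ih (b.drop (i+1).toNat) (by simp only [List.length_drop]; omega)]
            have : evenK (b.drop (i+1).toNat) = contK (b.drop (i+1).toNat) := by
              rw [evenK, if_pos (by simp only [List.length_drop]; omega)]
            rw [this]; ring)]
        rw [PySem.List.foldl_add _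
          (fun i => PySem.List.pyGetD b 0 0 * (PySem.List.pyGetD b i 0 * contK (b.drop (i+1).toNat)))]
        rw [List.sum_map_mul_left]
        rw [evenK, if_pos h2]
        by_cases hn4 : 4 ≤ b.length
        · rw [if_pos (by exact_mod_cast by omega), loop_sum b hn4 h2]
          rw [PySem.List.pyGetD_neg_ofNat b 1 0 (by omega) (by omega)]
          obtain ⟨x, rest, rfl⟩ : ∃ x rest, b = x :: rest := by
            cases b with | nil => simp at h0 | cons x r => exact ⟨x, r, rfl⟩
          obtain ⟨y, t, rfl⟩ : ∃ y t, rest = y :: t := by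
            cases rest with | nil => simp at hn2 | cons y r => exact ⟨y, r, rfl⟩
          have hcb : contK (x :: y :: t) = x * contK (y :: t) + contK t := rfl
          have hct : contK (y :: t) = y * contK t + contK t.tail :=
            contK_cons y t (by intro hh; rw [hh] at hn4; simp at hn4)
          have hd2 : (x :: y :: t).drop 2 = t := rfl
          have hd3 : (x :: y :: t).drop 3 = t.tail := by
            cases t with | nil => rfl | cons u t' => rfl
          have hg0 : PySem.List.pyGetD (x :: y :: t) 0 0 = x := PySem.List.pyGetD_zero_cons x _ 0
          have hg1 : PySem.List.pyGetD (x :: y :: t) 1 0 = y := by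
            rw [PySem.List.pyGetD_eq_getElem _ _ (by norm_num) (by simp)]
            rfl
          have hgl : (x :: y :: t)[(x :: y :: t).length - 1] =
              (x :: y :: t).getD ((x :: y :: t).length - 1) 0 := by
            rw [List.getD_eq_getElem _ _ (by simp)]
            rfl
          rw [hg0, hg1, hd2, hd3, hcb, hct, hgl]
          ring
        · have hn2' : b.length = 2 := by omega
          rw [if_neg (by exact_mod_cast by omega)]
          obtain ⟨x, y, rfl⟩ := List.length_eq_two.mp hn2'
          have hr : PySem.List.pyRange 3 (((2:Nat) : Int) - 2) 2 = [] := by decide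
          simp only [List.length_cons, List.length_nil] at hr ⊢
          rw [hr]
          have hg1 : PySem.List.pyGetD [x, y] 1 0 = y := by
            rw [PySem.List.pyGetD_eq_getElem _ _ (by norm_num) (by simp)]
            rfl
          simp [contK, PySem.List.pyGetD_zero_cons, hg1]

theorem even_eq (b : List Int) : even b = evenK b :=
  evenFuel_eq (b.length + 1) b (by omega)

theorem ktable (b : List Int) (hb : b ≠ []) :
    ∀ j : Nat, 1 ≤ j → j ≤ b.length →
      (PySem.List.pyRange 2 ((j : Int) + 1) 1).foldl
        (fun K m => K ++ [PySem.List.pyGetD b (m-1) 0 * PySem.List.pyGetD K (m-1) 0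
                          + PySem.List.pyGetD K (m-2) 0])
        [1, PySem.List.pyGetD b 0 0]
      = (List.range (j+1)).map (fun m => contK (b.take m)) := by
  intro j
  induction j with
  | zero => intro h1 _; omega
  | succ j ihj =>
    intro _ hle
    by_cases h : j = 0
    · subst h
      rw [PySem.List.pyRange_one_eq_nil (by norm_num)]
      simp only [List.foldl_nil]
      have : List.range 2 = [0, 1] := by decide
      rw [this]
      simp only [List.map_cons, List.map_nil, List.take_zero]
      obtain ⟨x, rest, rfl⟩ : ∃ x rest, b = x :: rest := by
        cases b with | nil => exact absurd rfl hb | cons x r => exact ⟨x, r, rfl⟩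
      simp [contK, PySem.List.pyGetD_zero_cons]
    · have h1j : 1 ≤ j := by omega
      have e : (((j+1:ℕ)) : Int) + 1 = ((j : Int) + 1) + 1 := by push_cast; ring
      rw [e, PySem.List.pyRange_one_succ_right (by omega), List.foldl_append,
          ihj h1j (by omega)]
      simp only [List.foldl_cons, List.foldl_nil]
      have hK1 : PySem.List.pyGetD ((List.range (j+1)).map (fun m => contK (b.take m)))
          ((j:Int) + 1 - 1) 0 = contK (b.take j) := by
        have e1 : (j:Int) + 1 - 1 = ((j:ℕ):Int) := by ring
        rw [e1, PySem.List.pyGetD_natCast, PySem.List.getD_map_range _ _ _ _ (by omega)]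
      have hK2 : PySem.List.pyGetD ((List.range (j+1)).map (fun m => contK (b.take m)))
          ((j:Int) + 1 - 2) 0 = contK (b.take (j-1)) := by
        have e1 : (j:Int) + 1 - 2 = (((j-1:ℕ)):Int) := by omega
        rw [e1, PySem.List.pyGetD_natCast, PySem.List.getD_map_range _ _ _ _ (by omega)]
      have hb1 : PySem.List.pyGetD b ((j:Int) + 1 - 1) 0 = b[j]'(by omega) := by
        have e1 : (j:Int) + 1 - 1 = ((j:ℕ):Int) := by ring
        rw [e1, PySem.List.pyGetD_eq_getElem _ _ (by omega) (by exact_mod_cast by omega)]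
        simp
      rw [hK1, hK2, hb1]
      have htake : b.take (j+1) = b.take j ++ [b[j]'(by omega)] := by
        rw [List.take_add_one]
        congr 1
        rw [List.getElem?_eq_getElem (by omega)]
        rfl
      have hcontK : contK (b.take (j+1)) = b[j]'(by omega) * contK (b.take j) + contK (b.take (j-1)) := by
        rw [htake, contK_append_singleton]
        have hne : b.take j ≠ [] := by
          intro hh
          have := congrArg List.length hh
          simp only [List.length_take, List.length_nil] at this
          omega
        rw [if_neg hne]
        congr 2
        rw [List.dropLast_eq_take, List.take_take]
        congr 1
        simp
        omega
      have hrange : List.range (j+1+1) = List.range (j+1) ++ [j+1] := List.range_succ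
      rw [hrange, List.map_append]
      congr 1
      simp only [List.map_cons, List.map_nil]
      rw [hcontK]

theorem evenK_take (b : List Int) (k : Nat) (hk : k ≤ b.length) :
    evenK (b.take k) = contK (b.take (k - k % 2)) := by
  rw [evenK]
  have hl : (b.take k).length = k := by simp; omega
  by_cases hp : k % 2 = 0
  · rw [if_pos (by rw [hl]; omega)]
    have e : k - k % 2 = k := by omega
    rw [e]
  · rw [if_neg (by rw [hl]; omega)]
    rw [List.dropLast_eq_take, List.take_take, hl]
    have e : min (k - 1) k = k - k % 2 := by omega
    rw [e]

theorem EvenWithFinal1_spec' (b : List Int) (h : b.length ≠ 1) :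
    EvenWithFinal1 b = EvenWithFinal1_alt b := by
  by_cases h0 : b.length = 0
  · simp only [EvenWithFinal1, EvenWithFinal1_alt, if_pos h0]
  · have hn2 : 2 ≤ b.length := by omega
    have hbne : b ≠ [] := by intro hh; rw [hh] at h0; simp at h0
    simp only [EvenWithFinal1, EvenWithFinal1_alt, if_neg h0]
    rw [ktable b hbne b.length (by omega) (le_refl _)]
    rw [PySem.List.slice_to_neg_ofNat b 2 (by omega)]
    rw [even_eq, evenK_take b (b.length - 2) (by omega)]
    -- B's K-table lookup for the head term
    have hmidx : ((b.length : Int) - 2) - PySem.Int.mod ((b.length : Int) - 2) 2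
        = (((b.length - 2) - (b.length - 2) % 2 : Nat) : Int) := by
      rw [PySem.Int.mod_eq_emod_of_pos (by norm_num : (0:Int) < 2)]
      omega
    rw [hmidx, PySem.List.pyGetD_natCast,
        PySem.List.getD_map_range _ _ _ _ (by omega)]
    -- identify the two loops
    rw [PySem.List.foldl_congr_mem _ _
      (fun r i => r + PySem.List.pyGetD b i 0 * contK (b.take (i.toNat - 1))) _
      (by
        intro acc i hi
        obtain ⟨h3le, hlt, hdvd⟩ := (PySem.List.mem_pyRange_iff_of_pos (by norm_num) i).mp hi
        rw [PySem.List.slice_to b (by omega), even_eq,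
            evenK_take b i.toNat (by omega)]
        have : i.toNat - i.toNat % 2 = i.toNat - 1 := by omega
        rw [this])]
    conv_rhs => rw [PySem.List.foldl_congr_mem _ _
      (fun r i => r + PySem.List.pyGetD b i 0 * contK (b.take (i.toNat - 1))) _
      (by
        intro acc i hi
        obtain ⟨h3le, hlt, hdvd⟩ := (PySem.List.mem_pyRange_iff_of_pos (by norm_num) i).mp hi
        have e1 : i - 1 = (((i.toNat - 1 : ℕ)) : Int) := by omega
        rw [e1, PySem.List.pyGetD_natCast,
            PySem.List.getD_map_range _ _ _ _ (by omega)])]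

-- ===== VERDICT (by name: the statement is the Claim_ definition above) =====
theorem EvenWithFinal1_spec : Claim_equal_EvenWithFinal1 := by
  intro b _ hpre
  exact EvenWithFinal1_spec' b hpre
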